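-- pv_equiv track=rewrite | github.com/EEEEEEYu/EventRepContrastiveLearning | model/convnext_utils/convnext_blocks.py | _factorize_ratio
-- ===== SOURCE A (Python) =====
-- from typing import List, Tuple, Optional
--
-- def _factorize_ratio(src: int, dst: int) -> List[int]:
--     """
--     Factorize the integer ratio src/dst into a sequence of {2, 2, 2, ...} (and optional initial 4).
--     We prefer small steps (2x) after an optional 4x stem. Assumes src % dst == 0.
--     """
--     assert src % dst == 0
--     r = src // dst
--     steps = []
--     if r >= 4 and r % 2 == 0:
--         # Prefer a 4x stem once at the beginning if divisible by 4 (ConvNeXt macro-design).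
--         while r % 4 == 0 and len(steps) == 0:
--             steps.append(4)
--             r //= 4
--     while r > 1:
--         assert r % 2 == 0, "Only powers of 2 supported for gentle downsampling."
--         steps.append(2)
--         r //= 2
--     return steps
-- ===== SOURCE B (Python) =====
-- def _factorize_ratio(src: int, dst: int):
--     """
--     Factorize the integer ratio src/dst into a sequence of {2, 2, 2, ...} (and optional initial 4).
--     Closed-form: read the number of 2x steps off the bit length instead of loop-stripping factors.
--     """
--     assert src % dst == 0
--     r = src // dst
--     if r <= 1:
--         return []
--     assert (r & (r - 1)) == 0, "Only powers of 2 supported for gentle downsampling."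
--     k = r.bit_length() - 1
--     return [4] + [2] * (k - 2) if k >= 2 else [2]
-- ===== Notes on version B (the rewrite author's own statement) =====
-- stated objective: simpler
-- what changed: Replaces A's two factor-stripping while-loops (an optional 4x stem loop then repeated halving) with a closed form: guard r <= 1, check power-of-two with r & (r-1), and build the step list directly from k = r.bit_length() - 1 as [4]+[2]*(k-2) or [2].
import Mathlib
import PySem

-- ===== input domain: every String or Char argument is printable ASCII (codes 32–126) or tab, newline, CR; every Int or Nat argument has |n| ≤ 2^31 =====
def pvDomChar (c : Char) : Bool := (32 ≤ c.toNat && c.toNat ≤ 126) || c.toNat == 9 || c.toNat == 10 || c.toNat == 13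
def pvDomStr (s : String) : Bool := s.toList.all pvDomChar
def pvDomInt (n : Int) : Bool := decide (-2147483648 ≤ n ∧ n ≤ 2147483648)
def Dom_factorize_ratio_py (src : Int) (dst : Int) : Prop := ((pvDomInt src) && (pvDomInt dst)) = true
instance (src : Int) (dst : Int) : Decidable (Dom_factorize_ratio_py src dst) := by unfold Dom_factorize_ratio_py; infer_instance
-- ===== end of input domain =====

-- B replaces A's two factor-stripping while-loops by a closed form read off the ratio's bit length (objective: simpler).
-- ===== PORT A =====
-- 'while r % 4 == 0 and len(steps) == 0: steps.append(4); r //= 4'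
def pyAStem (r : Int) (steps : List Int) : Int × List Int :=
  if PySem.Int.mod r 4 = 0 ∧ steps = [] then
    pyAStem (PySem.Int.floordiv r 4) (steps ++ [4])
  else (r, steps)
termination_by (if steps = [] then 1 else 0)
decreasing_by simp_all

-- 'while r > 1: assert r % 2 == 0, ...; steps.append(2); r //= 2'
def pyARest (r : Int) (steps : List Int) : List Int :=
  if r > 1 then
    if PySem.Int.mod r 2 = 0 then
      pyARest (PySem.Int.floordiv r 2) (steps ++ [2])
    else steps          -- assert r % 2 == 0 fails here (AssertionError; outside Pre_)
  else steps
termination_by r.toNat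
decreasing_by
  have h2 : PySem.Int.floordiv r 2 = r / 2 := PySem.Int.floordiv_eq_ediv_of_pos (by omega)
  rw [h2]; omega

def factorize_ratio_py (src : Int) (dst : Int) : List Int :=
  if PySem.Int.mod src dst = 0 then      -- 'assert src % dst == 0' (dst = 0 raises; outside Pre_)
    let r := PySem.Int.floordiv src dst
    let rs := if r ≥ 4 ∧ PySem.Int.mod r 2 = 0 then pyAStem r [] else (r, [])
    pyARest rs.1 rs.2
  else []

-- ===== PORT B =====
def factorize_ratio_py_alt (src : Int) (dst : Int) : List Int :=
  if PySem.Int.mod src dst = 0 then      -- 'assert src % dst == 0' (dst = 0 raises; outside Pre_)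
    let r := PySem.Int.floordiv src dst
    if r ≤ 1 then []
    else if PySem.Int.band r (r - 1) = 0 then
      -- k = r.bit_length() - 1 (r > 1 here, so bitLength is Python's bit_length exactly)
      let k : Int := (PySem.Int.bitLength r : Int) - 1
      if k ≥ 2 then 4 :: List.replicate (k - 2).toNat 2 else [2]   -- [4] + [2]*(k-2)
    else []             -- assert (r & (r-1)) == 0 fails here (AssertionError; outside Pre_)
  else []

-- ===== PRECONDITION & SPEC =====
-- Pre_ excludes exactly the inputs on which A raises: dst == 0 (ZeroDivisionError),
-- src % dst != 0 (AssertionError), and ratios > 1 that are not powers of two (AssertionError).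
def Pre_factorize_ratio_py (src : Int) (dst : Int) : Prop :=
  dst ≠ 0 ∧ PySem.Int.mod src dst = 0 ∧
    (PySem.Int.floordiv src dst ≤ 1 ∨
      (2 : Int) ^ (PySem.Int.bitLength (PySem.Int.floordiv src dst) - 1) =
        PySem.Int.floordiv src dst)
instance (src : Int) (dst : Int) : Decidable (Pre_factorize_ratio_py src dst) := by
  unfold Pre_factorize_ratio_py; infer_instance
def pvWitness_factorize_ratio_py : Int × Int := (8, 2)
def Spec_factorize_ratio_py (src : Int) (dst : Int) (out : List Int) : Prop := out = factorize_ratio_py_alt src dst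
instance (src : Int) (dst : Int) (out : List Int) : Decidable (Spec_factorize_ratio_py src dst out) := by unfold Spec_factorize_ratio_py; infer_instance

-- ===== CLAIM (what is proved, stated in full; the proofs are below) =====
def Claim_equal_factorize_ratio_py : Prop := ∀ (src : Int) (dst : Int), Dom_factorize_ratio_py src dst → Pre_factorize_ratio_py src dst → Spec_factorize_ratio_py src dst (factorize_ratio_py src dst)

-- ===== LEMMAS AND PROOFS =====

theorem nat_land_two_pow_sub_one (k : Nat) : 2 ^ k &&& (2 ^ k - 1) = 0 := by
  apply Nat.eq_of_testBit_eq; intro i; simp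

theorem band_two_pow (k : Nat) : PySem.Int.band ((2 : Int) ^ k) ((2 : Int) ^ k - 1) = 0 := by
  have h1 : (0 : Int) ≤ (2 : Int) ^ k := by positivity
  have h2 : (1 : Int) ≤ (2 : Int) ^ k := one_le_pow₀ (by norm_num)
  rw [PySem.Int.band_of_nonneg h1 (by omega)]
  have hc : ((2 : Int) ^ k) = ((2 ^ k : Nat) : Int) := by push_cast; ring
  have ht : ((2 : Int) ^ k).toNat = 2 ^ k := by rw [hc, Int.toNat_natCast]
  have ht2 : ((2 : Int) ^ k - 1).toNat = 2 ^ k - 1 := by rw [hc]; omega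
  rw [ht, ht2, nat_land_two_pow_sub_one]; rfl

theorem mod_two_pow_succ (k : Nat) : PySem.Int.mod ((2 : Int) ^ (k + 1)) 2 = 0 := by
  rw [PySem.Int.mod_eq_zero_iff_dvd]
  exact ⟨2 ^ k, by ring⟩

theorem floordiv_two_pow_succ (k : Nat) :
    PySem.Int.floordiv ((2 : Int) ^ (k + 1)) 2 = (2 : Int) ^ k := by
  rw [PySem.Int.floordiv_eq_iff_of_pos (by norm_num)]
  constructor
  · exact le_of_eq (by ring)
  · have hp : (2 : Int) ^ (k + 1) = 2 ^ k * 2 := by ring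
    have : (0 : Int) < 2 ^ k := by positivity
    nlinarith [hp, this]

theorem mod_four_two_pow (j : Nat) : PySem.Int.mod ((2 : Int) ^ (j + 2)) 4 = 0 := by
  rw [PySem.Int.mod_eq_zero_iff_dvd]
  exact ⟨2 ^ j, by ring⟩

theorem floordiv_four_two_pow (j : Nat) :
    PySem.Int.floordiv ((2 : Int) ^ (j + 2)) 4 = (2 : Int) ^ j := by
  rw [PySem.Int.floordiv_eq_iff_of_pos (by norm_num)]
  constructor
  · exact le_of_eq (by ring)
  · have hp : (2 : Int) ^ (j + 2) = 2 ^ j * 4 := by ring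
    have : (0 : Int) < 2 ^ j := by positivity
    nlinarith [hp, this]

theorem pyARest_pow (k : Nat) (steps : List Int) :
    pyARest ((2 : Int) ^ k) steps = steps ++ List.replicate k 2 := by
  induction k generalizing steps with
  | zero => rw [pyARest]; norm_num
  | succ k ih =>
    rw [pyARest]
    have hgt : ((2 : Int) ^ (k + 1)) > 1 := by
      have : (0 : Int) < 2 ^ k := by positivity
      calc (1 : Int) < 2 ^ k * 2 := by nlinarith
        _ = 2 ^ (k + 1) := by ring
    rw [if_pos hgt, if_pos (mod_two_pow_succ k), floordiv_two_pow_succ, ih]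
    simp [List.replicate_succ]

theorem pyAStem_pow (j : Nat) :
    pyAStem ((2 : Int) ^ (j + 2)) [] = ((2 : Int) ^ j, [4]) := by
  rw [pyAStem, if_pos ⟨mod_four_two_pow j, rfl⟩, floordiv_four_two_pow]
  rw [pyAStem]; simp

theorem pyARest_le_one (r : Int) (hr : r ≤ 1) (steps : List Int) :
    pyARest r steps = steps := by
  rw [pyARest, if_neg (by omega)]

-- ===== VERDICT (by name: the statement is the Claim_ definition above) =====
theorem factorize_ratio_py_spec : Claim_equal_factorize_ratio_py := by
  intro src dst _ hpre
  obtain ⟨hdst, hmod, hcase⟩ := hpre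
  unfold Spec_factorize_ratio_py factorize_ratio_py factorize_ratio_py_alt
  rw [if_pos hmod, if_pos hmod]
  dsimp only
  set r := PySem.Int.floordiv src dst with hr
  by_cases hr1 : r ≤ 1
  · -- ratio ≤ 1: both sides return []
    have hC : ¬ (r ≥ 4 ∧ PySem.Int.mod r 2 = 0) := by omega
    rw [if_neg hC, if_pos hr1]
    exact pyARest_le_one r hr1 []
  · have hpow := hcase.resolve_left hr1
    set K : Nat := PySem.Int.bitLength r - 1 with hK
    have hKpos : 1 ≤ K := by
      by_contra h
      have h0 : K = 0 := by omega
      rw [h0] at hpow; simp at hpow; omega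
    have hband : PySem.Int.band r (r - 1) = 0 := by
      rw [← hpow]; exact band_two_pow K
    have hn1 : 1 ≤ PySem.Int.bitLength r := by omega
    have hkInt : (PySem.Int.bitLength r : Int) - 1 = (K : Int) := by rw [hK]; omega
    rw [if_neg hr1, if_pos hband, hkInt]
    by_cases hK2 : ((K : Int) ≥ 2)
    · -- K ≥ 2: A takes the 4x stem once, B emits 4 :: replicate (K-2) 2
      have hex : ∃ j, K = j + 2 := ⟨K - 2, by omega⟩
      obtain ⟨j, hj⟩ := hex
      have hr2 : r = (2 : Int) ^ (j + 2) := by rw [← hpow, hj]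
      have hge4 : r ≥ 4 := by
        rw [hr2]
        calc (4 : Int) = 2 ^ 2 := by norm_num
          _ ≤ 2 ^ (j + 2) := pow_le_pow_right₀ (by norm_num) (by omega)
      have hmod2 : PySem.Int.mod r 2 = 0 := by
        rw [hr2]; exact mod_two_pow_succ (j + 1)
      have hC : r ≥ 4 ∧ PySem.Int.mod r 2 = 0 := ⟨hge4, hmod2⟩
      rw [if_pos hC, if_pos hK2, hr2, pyAStem_pow j]
      have hT : ((K : Int) - 2).toNat = j := by omega
      rw [hT]
      have := pyARest_pow j [4]
      simpa using this
    · -- K = 1: r = 2, both return [2]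
      have hK1 : K = 1 := by omega
      have hr2 : r = 2 := by rw [← hpow, hK1]; norm_num
      have hC : ¬ (r ≥ 4 ∧ PySem.Int.mod r 2 = 0) := by omega
      rw [if_neg hC, if_neg hK2, hr2]
      have := pyARest_pow 1 []
      norm_num at this
      exact this
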